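-- pv_equiv track=rewrite | github.com/progaddict/asr-ex-11 | lexical-prefix-tree.py | phonemes_to_triphones
-- ===== SOURCE A (Python) =====
-- def phonemes_to_triphones(phonemes):
--     triphones = []
--     # triphone positions
--     pre = "#"
--     mid = "#"
--     end = "#"
--     for i in range(0, len(phonemes)):
--         # edge case: beginning
--         if (i == 0):
--             pre = "#"
--         else:
--             pre = mid
--
--         mid = phonemes[i]
--
--         # edge case: end
--         if (i == len(phonemes) - 1):
--             end = "#"
--         else:
--             end = phonemes[i + 1]
--
--         triphones.append("" + mid + "{" + pre + "+" + end + "}")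
--
--     return triphones
-- ===== SOURCE B (Python) =====
-- def phonemes_to_triphones(phonemes):
--     remaining = list(phonemes)
--     rev = []
--     end = "#"
--     while remaining:
--         mid = remaining.pop()
--         pre = remaining[-1] if remaining else "#"
--         rev.append(mid + "{" + pre + "+" + end + "}")
--         end = mid
--     rev.reverse()
--     return rev
-- ===== Notes on version B (the rewrite author's own statement) =====
-- stated objective: alternative
-- what changed: Consumes the list right-to-left by popping its last element, carrying the successor phoneme instead of A's predecessor state, and builds the output back-to-front with a final reverse, replacing A's forward index loop with carried pre/mid/end registers and i==0 / i==len-1 boundary branches.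
import Mathlib
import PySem

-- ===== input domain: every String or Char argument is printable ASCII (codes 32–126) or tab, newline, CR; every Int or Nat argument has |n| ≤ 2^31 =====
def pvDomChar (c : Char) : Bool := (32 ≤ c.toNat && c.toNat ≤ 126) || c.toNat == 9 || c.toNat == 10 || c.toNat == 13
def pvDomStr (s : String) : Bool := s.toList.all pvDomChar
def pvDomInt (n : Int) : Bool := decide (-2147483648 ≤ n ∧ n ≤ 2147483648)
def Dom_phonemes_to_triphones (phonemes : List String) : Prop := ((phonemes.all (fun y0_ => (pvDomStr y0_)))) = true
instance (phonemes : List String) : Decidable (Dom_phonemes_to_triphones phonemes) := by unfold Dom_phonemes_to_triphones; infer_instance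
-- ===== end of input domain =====

-- B consumes the list right-to-left by popping the last element, carrying the successor
-- phoneme, and builds the output back-to-front, instead of A's forward index loop with
-- carried pre/mid/end state and boundary branches (objective: alternative).


-- ===== PORT A =====
-- state carried across the loop: (pre, mid, end, triphones)
def phonemes_to_triphones (phonemes : List String) : List String :=
  let n : Int := phonemes.length
  ((PySem.List.pyRange 0 n 1).foldl
    (fun (s : String × String × String × List String) i =>
      let pre := if i = 0 then "#" else s.2.1
      let mid := PySem.List.pyGetD phonemes i ""      -- phonemes[i], always in range
      let endp := if i = n - 1 then "#"
                  else PySem.List.pyGetD phonemes (i + 1) ""   -- phonemes[i+1], in range here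
      (pre, mid, endp, s.2.2.2 ++ ["" ++ mid ++ "{" ++ pre ++ "+" ++ endp ++ "}"]))
    ("#", "#", "#", [])).2.2.2

-- ===== PORT B =====
-- Source B's while loop over 'remaining', popping the LAST element each step; it is
-- transcribed over the reversed list, whose head is exactly remaining.pop() and whose
-- next element is remaining[-1]; consing onto 'rev' transcribes append + final reverse.
def goB : List String → String → List String → List String
  | [], _, rev => rev
  | mid :: rest, endp, rev =>
      let pre := match rest with | [] => "#" | p :: _ => p   -- remaining[-1] if remaining else "#"
      goB rest mid ((mid ++ "{" ++ pre ++ "+" ++ endp ++ "}") :: rev)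

def phonemes_to_triphones_alt (phonemes : List String) : List String :=
  goB phonemes.reverse "#" []

-- ===== PRECONDITION & SPEC =====
def Spec_phonemes_to_triphones (phonemes : List String) (out : List String) : Prop := out = phonemes_to_triphones_alt phonemes
instance (phonemes : List String) (out : List String) : Decidable (Spec_phonemes_to_triphones phonemes out) := by unfold Spec_phonemes_to_triphones; infer_instance

-- ===== CLAIM (what is proved, stated in full; the proofs are below) =====
def Claim_equal_phonemes_to_triphones : Prop := ∀ (phonemes : List String), Dom_phonemes_to_triphones phonemes → Spec_phonemes_to_triphones phonemes (phonemes_to_triphones phonemes)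

-- ===== LEMMAS AND PROOFS =====

-- reference shape: one triphone per element, pre = previous element (or "#"),
-- end = next element (or "#")
def triGo (pre : String) : List String → List String
  | [] => []
  | mid :: rest =>
      (mid ++ "{" ++ pre ++ "+" ++ (match rest with | [] => "#" | e :: _ => e) ++ "}")
        :: triGo mid rest

-- triGo with an explicit end-context for the LAST element
def triF (pre : String) : List String → String → List String
  | [], _ => []
  | mid :: rest, e =>
      (mid ++ "{" ++ pre ++ "+" ++ (match rest with | [] => e | e2 :: _ => e2) ++ "}")
        :: triF mid rest e

lemma triGo_eq_triF (pre : String) (xs : List String) : triGo pre xs = triF pre xs "#" := by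
  induction xs generalizing pre with
  | nil => rfl
  | cons m rest ih =>
      cases rest with
      | nil => rfl
      | cons a as =>
          show (m ++ "{" ++ pre ++ "+" ++ a ++ "}") :: triGo m (a :: as)
             = (m ++ "{" ++ pre ++ "+" ++ a ++ "}") :: triF m (a :: as) "#"
          rw [ih]

lemma triF_append (ys : List String) (x pre e : String) :
    triF pre (ys ++ [x]) e
      = triF pre ys x ++ [x ++ "{" ++ (match ys.getLast? with | none => pre | some p => p) ++ "+" ++ e ++ "}"] := by
  induction ys generalizing pre with
  | nil => simp [triF]
  | cons m rest ih =>
      cases rest with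
      | nil => simp [triF]
      | cons m2 rs =>
          have h := ih m
          calc triF pre ((m :: m2 :: rs) ++ [x]) e
              = (m ++ "{" ++ pre ++ "+" ++ m2 ++ "}") :: triF m ((m2 :: rs) ++ [x]) e := rfl
            _ = (m ++ "{" ++ pre ++ "+" ++ m2 ++ "}")
                  :: (triF m (m2 :: rs) x
                      ++ [x ++ "{" ++ (match (m2 :: rs).getLast? with | none => m | some p => p) ++ "+" ++ e ++ "}"]) := by
                rw [h]
            _ = triF pre (m :: m2 :: rs) x
                  ++ [x ++ "{" ++ (match (m :: m2 :: rs).getLast? with | none => pre | some p => p) ++ "+" ++ e ++ "}"] := by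
                rw [List.getLast?_cons_cons]
                cases h2 : (m2 :: rs).getLast? with
                | none => simp at h2
                | some p => simp only [h2]; rfl

lemma goB_eq (ys : List String) : ∀ (e : String) (rev : List String),
    goB ys e rev = (triF "#" ys.reverse e) ++ rev := by
  induction ys with
  | nil => intro e rev; simp [goB, triF]
  | cons mid rest ih =>
      intro e rev
      simp only [goB, List.reverse_cons]
      rw [ih mid, triF_append]
      have hhead : (match rest with | [] => "#" | p :: _ => p)
          = (match rest.reverse.getLast? with | none => "#" | some p => p) := by
        cases h : rest with
        | nil => simp
        | cons a as => rw [List.getLast?_reverse]; simp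
      rw [hhead]
      simp

lemma loopA (xs : List String) (j : ℕ) : ∀ (k : ℕ), k + j = xs.length →
    ∀ (pre0 endp0 mid : String) (acc : List String), (k = 0 → mid = "#") →
    ((PySem.List.pyRange (k : Int) (xs.length : Int) 1).foldl
      (fun (s : String × String × String × List String) i =>
        let pre := if i = 0 then "#" else s.2.1
        let m := PySem.List.pyGetD xs i ""
        let endp := if i = (xs.length : Int) - 1 then "#"
                    else PySem.List.pyGetD xs (i + 1) ""
        (pre, m, endp, s.2.2.2 ++ ["" ++ m ++ "{" ++ pre ++ "+" ++ endp ++ "}"]))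
      (pre0, mid, endp0, acc)).2.2.2 = acc ++ triGo mid (xs.drop k) := by
  induction j with
  | zero =>
      intro k hk pre0 endp0 mid acc _
      have hkl : k = xs.length := by omega
      rw [PySem.List.pyRange_one_eq_nil (by exact_mod_cast Nat.le_of_eq hkl.symm)]
      simp [hkl, triGo]
  | succ j ih =>
      intro k hk pre0 endp0 mid acc hmid
      have hklt : k < xs.length := by omega
      rw [PySem.List.pyRange_one_cons (by exact_mod_cast hklt)]
      simp only [List.foldl_cons]
      have hpre : (if (k : Int) = 0 then "#" else mid) = mid := by
        by_cases h : k = 0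
        · simp [h, hmid h]
        · have hne : (k : Int) ≠ 0 := by exact_mod_cast h
          rw [if_neg hne]
      have hmid' : PySem.List.pyGetD xs (k : Int) "" = xs[k] := by
        rw [PySem.List.pyGetD_natCast]; exact List.getD_eq_getElem _ _ hklt
      rw [hpre, hmid']
      have hdrop : xs.drop k = xs[k] :: xs.drop (k + 1) :=
        List.drop_eq_getElem_cons hklt
      have step : ((k : Int) + 1) = ((k + 1 : ℕ) : Int) := by push_cast; ring
      by_cases hlast : k = xs.length - 1
      · have hdrop1 : xs.drop (k + 1) = [] := by
          apply List.drop_eq_nil_of_le; omega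
        have hcond : ((k : Int) = (xs.length : Int) - 1) := by omega
        simp only [if_pos hcond]
        rw [show ((k : Int) + 1) = ((k + 1 : ℕ) : Int) from step,
          ih (k + 1) (by omega) _ _ _ _ (by omega)]
        rw [hdrop, hdrop1, triGo]
        simp [triGo]
      · have hk1 : k + 1 < xs.length := by omega
        have hcond : ¬ ((k : Int) = (xs.length : Int) - 1) := by omega
        have hend : PySem.List.pyGetD xs ((k : Int) + 1) "" = xs[k + 1] := by
          rw [step, PySem.List.pyGetD_natCast]; exact List.getD_eq_getElem _ _ hk1
        simp only [if_neg hcond]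
        rw [hend, show ((k : Int) + 1) = ((k + 1 : ℕ) : Int) from step,
          ih (k + 1) (by omega) _ _ _ _ (by omega)]
        rw [hdrop, List.drop_eq_getElem_cons hk1, triGo]
        simp [triGo]

lemma a_eq_triGo (xs : List String) : phonemes_to_triphones xs = triGo "#" xs := by
  unfold phonemes_to_triphones
  have := loopA xs xs.length 0 (by omega) "#" "#" "#" [] (fun _ => rfl)
  simpa using this

-- ===== VERDICT (by name: the statement is the Claim_ definition above) =====
theorem phonemes_to_triphones_spec : Claim_equal_phonemes_to_triphones := by
  intro phonemes _
  unfold Spec_phonemes_to_triphones phonemes_to_triphones_alt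
  rw [a_eq_triGo, goB_eq]
  simp [triGo_eq_triF]
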